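-- pv_equiv track=rewrite | github.com/alexisgxrcia/sql-syntax-analyzer | core/analyzer_syntax.py | _simplify_stack
-- ===== SOURCE A (Python) =====
-- def _simplify_stack(stack):
--     if not stack:
--         return stack
--
--     simplified = stack.copy()
--
--     i = 0
--     while i < len(simplified) - 3:
--         if (simplified[i:i+4] == [53, 201, 55, 312] or
--             simplified[i:i+3] == [53, 201, 55] or
--             simplified[i:i+2] == [53, 201]):
--             simplified = simplified[:i] + simplified[i+4:]
--             i = 0
--         else:
--             i += 1
--
--     return simplified
-- ===== SOURCE B (Python) =====
-- def _simplify_stack(stack):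
--     # Single left-to-right pass: keep an output stack; when a 201 arrives on top
--     # of a 53 and at least two elements remain, drop the 53, the 201, and skip
--     # the next two input elements (A deletes a 4-slice and rescans from 0).
--     out = []
--     skip = 0
--     n = len(stack)
--     for idx, x in enumerate(stack):
--         if skip:
--             skip -= 1
--         elif x == 201 and out and out[-1] == 53 and n - idx - 1 >= 2:
--             out.pop()
--             skip = 2
--         else:
--             out.append(x)
--     return out
-- ===== Notes on version B (the rewrite author's own statement) =====
-- stated objective: faster
-- what changed: A repeatedly rescans from index 0 after each 4-element deletion (quadratic delete-and-restart while loop); B does a single left-to-right pass maintaining an output stack, popping the 53 when a 201 arrives on top of it with at least two elements remaining and skipping the next two input elements.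
import Mathlib
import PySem

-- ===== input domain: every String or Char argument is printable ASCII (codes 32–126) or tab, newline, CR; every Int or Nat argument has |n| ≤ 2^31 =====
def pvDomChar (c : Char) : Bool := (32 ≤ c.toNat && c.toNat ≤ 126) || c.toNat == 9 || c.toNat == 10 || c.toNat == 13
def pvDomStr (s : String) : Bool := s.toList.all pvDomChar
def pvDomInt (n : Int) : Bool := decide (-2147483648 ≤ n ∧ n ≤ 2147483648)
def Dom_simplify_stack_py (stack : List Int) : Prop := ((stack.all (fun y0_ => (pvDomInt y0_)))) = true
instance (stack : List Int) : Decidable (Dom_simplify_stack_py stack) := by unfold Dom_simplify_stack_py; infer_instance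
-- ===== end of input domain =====

-- B replaces A's delete-and-rescan-from-zero while loop by a single left-to-right
-- pass with an output stack and a skip counter (objective: faster, O(n) vs O(n^2)).

-- ===== PORT A =====
-- A's while loop: state (simplified, i); on a match delete the 4-slice and restart at 0.
def simplify_stack_py_loop (s : List Int) (i : Nat) : List Int :=
  if h : i < s.length - 3 then
    if (PySem.List.slice s (some (i : Int)) (some ((i : Int) + 4)) == [53, 201, 55, 312]) ||
       (PySem.List.slice s (some (i : Int)) (some ((i : Int) + 3)) == [53, 201, 55]) ||
       (PySem.List.slice s (some (i : Int)) (some ((i : Int) + 2)) == [53, 201]) then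
      simplify_stack_py_loop
        (PySem.List.slice s none (some (i : Int)) ++ PySem.List.slice s (some ((i : Int) + 4)) none) 0
    else
      simplify_stack_py_loop s (i + 1)
  else
    s
termination_by (s.length, s.length - i)
decreasing_by
  · apply Prod.Lex.left
    rw [PySem.List.slice_to_natCast,
        show ((i : Int) + 4) = (((i + 4 : Nat) : Int)) by push_cast; ring,
        PySem.List.slice_from_natCast]
    simp only [List.length_append, List.length_take, List.length_drop]
    omega
  · apply Prod.Lex.right
    omega

def simplify_stack_py (stack : List Int) : List Int :=
  match stack with
  | [] => stack
  | _ => simplify_stack_py_loop stack 0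

-- ===== PORT B =====
-- B's single pass: acc is the output stack (reversed), skip counts forward-deleted elements.
def simplify_stack_py_alt_loop (n : Nat) (acc : List Int) (skip : Nat) (idx : Nat)
    (rest : List Int) : List Int :=
  match rest with
  | [] => acc.reverse
  | x :: r =>
    if skip ≠ 0 then
      simplify_stack_py_alt_loop n acc (skip - 1) (idx + 1) r
    else if x = 201 ∧ acc.head? = some 53 ∧ 2 ≤ n - idx - 1 then
      simplify_stack_py_alt_loop n acc.tail 2 (idx + 1) r
    else
      simplify_stack_py_alt_loop n (x :: acc) 0 (idx + 1) r

def simplify_stack_py_alt (stack : List Int) : List Int :=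
  simplify_stack_py_alt_loop stack.length [] 0 0 stack

-- ===== PRECONDITION & SPEC =====
def Spec_simplify_stack_py (stack : List Int) (out : List Int) : Prop := out = simplify_stack_py_alt stack
instance (stack : List Int) (out : List Int) : Decidable (Spec_simplify_stack_py stack out) := by unfold Spec_simplify_stack_py; infer_instance

-- ===== CLAIM (what is proved, stated in full; the proofs are below) =====
def Claim_equal_simplify_stack_py : Prop := ∀ (stack : List Int), Dom_simplify_stack_py stack → Spec_simplify_stack_py stack (simplify_stack_py stack)

-- ===== LEMMAS AND PROOFS =====

-- `isM s j`: A's removal condition holds at index j (a 53,201 pair with 2 more elements after).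
def isM (s : List Int) (j : Nat) : Bool :=
  decide (j + 4 ≤ s.length) && (s.getD j 0 == 53) && (s.getD (j + 1) 0 == 201)

def firstM (s : List Int) : Option Nat := (List.range s.length).find? (isM s)

lemma firstM_isM {s : List Int} {j : Nat} (h : firstM s = some j) : isM s j = true :=
  List.find?_some h

lemma isM_le {s : List Int} {j : Nat} (h : isM s j = true) : j + 4 ≤ s.length := by
  simp only [isM, Bool.and_eq_true, decide_eq_true_eq] at h
  exact h.1.1

-- The common specification: repeatedly delete the 4-slice at the first match.
def specSimp (s : List Int) : List Int :=
  match h : firstM s with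
  | some j => specSimp (s.take j ++ s.drop (j + 4))
  | none => s
termination_by s.length
decreasing_by
  have h4 := isM_le (firstM_isM h)
  simp only [List.length_append, List.length_take, List.length_drop]
  omega

lemma find?_range_eq_some {p : Nat → Bool} {n i : Nat} (hi : i < n) (hp : p i = true)
    (hmin : ∀ j < i, p j = false) : (List.range n).find? p = some i := by
  induction n with
  | zero => omega
  | succ m ih =>
    rw [List.range_succ, List.find?_append]
    rcases Nat.lt_or_ge i m with hlt | hge
    · rw [ih hlt]; rfl
    · have him : i = m := by omega
      have hnone : (List.range m).find? p = none := by
        rw [List.find?_eq_none]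
        intro j hj
        have := List.mem_range.mp hj
        exact (Bool.not_eq_true _).mpr (hmin j (by omega))
      have hpm : p m = true := him ▸ hp
      rw [hnone, him]
      simp [List.find?, hpm]

lemma find?_range_eq_none {p : Nat → Bool} {n : Nat} (h : ∀ j < n, p j = false) :
    (List.range n).find? p = none := by
  rw [List.find?_eq_none]
  intro j hj
  exact (Bool.not_eq_true _).mpr (h j (List.mem_range.mp hj))

lemma firstM_eq_some {s : List Int} {i : Nat} (hp : isM s i = true)
    (hmin : ∀ j < i, isM s j = false) : firstM s = some i :=
  find?_range_eq_some (by have := isM_le hp; omega) hp hmin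

lemma firstM_eq_none {s : List Int} (h : ∀ j, isM s j = false) : firstM s = none :=
  find?_range_eq_none (fun j _ => h j)

lemma specSimp_of_none {s : List Int} (h : firstM s = none) : specSimp s = s := by
  rw [specSimp, h]

lemma specSimp_of_some {s : List Int} {j : Nat} (h : firstM s = some j) :
    specSimp s = specSimp (s.take j ++ s.drop (j + 4)) := by
  rw [specSimp, h]

-- A's boolean condition equals isM when i+4 ≤ length.
lemma pyCond_eq (s : List Int) (i : Nat) (h : i + 4 ≤ s.length) :
    ((PySem.List.slice s (some (i : Int)) (some ((i : Int) + 4)) == [53, 201, 55, 312]) ||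
     (PySem.List.slice s (some (i : Int)) (some ((i : Int) + 3)) == [53, 201, 55]) ||
     (PySem.List.slice s (some (i : Int)) (some ((i : Int) + 2)) == [53, 201])) = isM s i := by
  have h4 : 4 ≤ (s.drop i).length := by simp [List.length_drop]; omega
  obtain ⟨a, t1, h1⟩ : ∃ a t1, s.drop i = a :: t1 := by
    cases hd : s.drop i with
    | nil => rw [hd] at h4; simp at h4
    | cons a t => exact ⟨a, t, rfl⟩
  have ht1 : 3 ≤ t1.length := by
    have := congrArg List.length h1; simp at this; omega
  obtain ⟨b, t2, h2⟩ : ∃ b t2, t1 = b :: t2 := by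
    cases hd : t1 with
    | nil => rw [hd] at ht1; simp at ht1
    | cons b t => exact ⟨b, t, rfl⟩
  have ht2 : 2 ≤ t2.length := by
    have := congrArg List.length h2; simp at this; omega
  obtain ⟨c, t3, h3⟩ : ∃ c t3, t2 = c :: t3 := by
    cases hd : t2 with
    | nil => rw [hd] at ht2; simp at ht2
    | cons c t => exact ⟨c, t, rfl⟩
  have ht3 : 1 ≤ t3.length := by
    have := congrArg List.length h3; simp at this; omega
  obtain ⟨d, t4, h4'⟩ : ∃ d t4, t3 = d :: t4 := by
    cases hd : t3 with
    | nil => rw [hd] at ht3; simp at ht3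
    | cons d t => exact ⟨d, t, rfl⟩
  have hdrop : s.drop i = a :: b :: c :: d :: t4 := by rw [h1, h2, h3, h4']
  have ha : s.getD i 0 = a := by
    have : s.getD i 0 = (s.drop i).getD 0 0 := by
      simp [List.getD, List.getElem?_drop]
    rw [this, hdrop]; rfl
  have hb : s.getD (i + 1) 0 = b := by
    have : s.getD (i + 1) 0 = (s.drop i).getD 1 0 := by
      simp [List.getD, List.getElem?_drop]
    rw [this, hdrop]; rfl
  have e2 : ((i : Int) + 2) = (((i + 2 : Nat) : Int)) := by push_cast; ring
  have e3 : ((i : Int) + 3) = (((i + 3 : Nat) : Int)) := by push_cast; ring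
  have e4 : ((i : Int) + 4) = (((i + 4 : Nat) : Int)) := by push_cast; ring
  rw [e2, e3, e4, PySem.List.slice_natCast, PySem.List.slice_natCast, PySem.List.slice_natCast,
    hdrop]
  simp only [isM, ha, hb, show i + 4 - i = 4 by omega, show i + 3 - i = 3 by omega,
    show i + 2 - i = 2 by omega]
  have hlen : decide (i + 4 ≤ s.length) = true := by simpa using h
  rw [hlen]
  by_cases hA : a = 53 <;> by_cases hB : b = 201 <;> simp [hA, hB, List.take]

-- Transferring a non-match along a shared prefix.
lemma isM_of_prefix (p u v : List Int) (j : Nat) (hj : j + 1 < p.length)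
    (hle : v.length ≤ u.length) (hM : isM (p ++ v) j = true) : isM (p ++ u) j = true := by
  simp only [isM, Bool.and_eq_true, decide_eq_true_eq, beq_iff_eq, List.length_append] at hM ⊢
  obtain ⟨⟨hlen, h53⟩, h201⟩ := hM
  rw [List.getD_append _ _ _ _ (by omega)] at h53 h201
  refine ⟨⟨by omega, ?_⟩, ?_⟩
  · rw [List.getD_append _ _ _ _ (by omega)]; exact h53
  · rw [List.getD_append _ _ _ _ (by omega)]; exact h201

-- A's loop computes specSimp once no match exists left of i.
lemma aLoop_eq_spec : ∀ (s : List Int) (i : Nat),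
    (∀ j, j < i → isM s j = false) → simplify_stack_py_loop s i = specSimp s := by
  intro s i
  induction s, i using simplify_stack_py_loop.induct with
  | case1 s i h hc ih =>
    intro hmin
    have h4 : i + 4 ≤ s.length := by omega
    have hMi : isM s i = true := by rw [← pyCond_eq s i h4]; exact hc
    rw [simplify_stack_py_loop]
    rw [dif_pos h, if_pos hc]
    rw [PySem.List.slice_to_natCast,
        show ((i : Int) + 4) = (((i + 4 : Nat) : Int)) by push_cast; ring,
        PySem.List.slice_from_natCast] at ih ⊢
    rw [ih (fun j hj => by omega)]
    rw [specSimp_of_some (firstM_eq_some hMi hmin)]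
  | case2 s i h hc ih =>
    intro hmin
    rw [simplify_stack_py_loop]
    rw [dif_pos h, if_neg (by simpa using hc)]
    apply ih
    intro j hj
    rcases Nat.lt_or_ge j i with hlt | hge
    · exact hmin j hlt
    · have : j = i := by omega
      subst this
      rw [← pyCond_eq s j (by omega)]
      simpa using hc
  | case3 s i h =>
    intro hmin
    rw [simplify_stack_py_loop, dif_neg h]
    rw [specSimp_of_none]
    apply firstM_eq_none
    intro j
    cases hM : isM s j with
    | false => rfl
    | true =>
      exfalso
      have h4 := isM_le hM
      have hji : j < i := by omega
      rw [hmin j hji] at hM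
      exact Bool.false_ne_true hM

-- Skipping two elements just drops them.
lemma bLoop_skip2 (n : Nat) (acc : List Int) (idx : Nat) (y z : Int) (r : List Int) :
    simplify_stack_py_alt_loop n acc 2 idx (y :: z :: r)
      = simplify_stack_py_alt_loop n acc 0 (idx + 2) r := by
  norm_num [simplify_stack_py_alt_loop]

-- On exhausted input B returns its output stack, which specSimp leaves unchanged.
lemma bLoop_nil_spec (acc : List Int) (n idx : Nat)
    (hinv : ∀ j, j + 1 < acc.length → isM (acc.reverse ++ []) j = false) :
    simplify_stack_py_alt_loop n acc 0 idx [] = specSimp (acc.reverse ++ []) := by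
  have hnone : firstM (acc.reverse ++ []) = none := by
    apply firstM_eq_none
    intro j
    cases hM : isM (acc.reverse ++ []) j with
    | false => rfl
    | true =>
      exfalso
      have h4 := isM_le hM
      simp only [List.append_nil, List.length_reverse] at h4
      rw [hinv j (by omega)] at hM
      exact Bool.false_ne_true hM
  rw [simplify_stack_py_alt_loop, specSimp_of_none hnone]
  simp

-- B's loop computes specSimp of (already-emitted output ++ remaining input),
-- given no match strictly inside the emitted part.
lemma bLoop_eq_spec : ∀ (m : Nat) (rest acc : List Int) (n idx : Nat),
    rest.length ≤ m → idx + rest.length = n →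
    (∀ j, j + 1 < acc.length → isM (acc.reverse ++ rest) j = false) →
    simplify_stack_py_alt_loop n acc 0 idx rest = specSimp (acc.reverse ++ rest) := by
  intro m
  induction m with
  | zero =>
    intro rest acc n idx hm hn hinv
    have : rest = [] := List.eq_nil_of_length_eq_zero (by omega)
    subst this
    exact bLoop_nil_spec acc n idx hinv
  | succ m ih =>
    intro rest acc n idx hm hn hinv
    match rest with
    | [] => exact bLoop_nil_spec acc n idx hinv
    | x :: r =>
      rw [simplify_stack_py_alt_loop]
      simp only [if_neg (by simp : ¬((0:Nat) ≠ 0))]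
      have hrl : n - idx - 1 = r.length := by simp at hn; omega
      by_cases hc : x = 201 ∧ acc.head? = some 53 ∧ 2 ≤ n - idx - 1
      · rw [if_pos hc]
        obtain ⟨hx, hh, h2⟩ := hc
        obtain ⟨a0, acc', hacc⟩ : ∃ a0 acc', acc = a0 :: acc' := by
          cases acc with
          | nil => simp at hh
          | cons a t => exact ⟨a, t, rfl⟩
        have ha0 : a0 = 53 := by rw [hacc] at hh; simpa using hh
        obtain ⟨y, z, r', hr'⟩ : ∃ y z r', r = y :: z :: r' := by
          match r, (by omega : 2 ≤ r.length) with
          | y :: z :: r', _ => exact ⟨y, z, r', rfl⟩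
        subst hacc ha0 hx hr'
        -- the whole current list, regrouped around the match
        have hL : (((53:Int) :: acc').reverse ++ (201:Int) :: y :: z :: r')
            = acc'.reverse ++ ((53:Int) :: 201 :: y :: z :: r') := by
          simp
        simp only [List.tail_cons]
        rw [bLoop_skip2]
        have hinv' : ∀ j, j + 1 < acc'.length → isM (acc'.reverse ++ r') j = false := by
          intro j hj
          cases hM : isM (acc'.reverse ++ r') j with
          | false => rfl
          | true =>
            exfalso
            have := isM_of_prefix acc'.reverse ((53:Int) :: 201 :: y :: z :: r') r' j
              (by simpa using hj) (by simp; omega) hM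
            rw [← hL] at this
            rw [hinv j (by simp; omega)] at this
            exact Bool.false_ne_true this
        rw [ih r' acc' n (idx + 3) (by simp at hm; omega) (by simp at hn; omega) hinv']
        -- specSimp of the full list takes one deletion step at index acc'.length
        have hM : isM (((53:Int) :: acc').reverse ++ (201:Int) :: y :: z :: r')
            acc'.length = true := by
          rw [hL]
          simp only [isM, Bool.and_eq_true, decide_eq_true_eq, beq_iff_eq, List.length_append]
          refine ⟨⟨by simp, ?_⟩, ?_⟩
          · rw [List.getD_append_right _ _ _ _ (by simp)]
            simp
          · rw [List.getD_append_right _ _ _ _ (by simp)]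
            simp
        have hfirst : firstM (((53:Int) :: acc').reverse ++ (201:Int) :: y :: z :: r')
            = some acc'.length :=
          firstM_eq_some hM (fun j hj => hinv j (by simp; omega))
        rw [specSimp_of_some hfirst]
        congr 1
        rw [hL, List.take_append_of_le_length (by simp), List.take_of_length_le (by simp)]
        rw [show acc'.length + 4 = acc'.reverse.length + 4 by simp, List.drop_append]
        simp
      · rw [if_neg hc]
        have hinv'' : ∀ j, j + 1 < (x :: acc).length
            → isM ((x :: acc).reverse ++ r) j = false := by
          intro j hj
          have hL2 : (x :: acc).reverse ++ r = acc.reverse ++ x :: r := by simp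
          rw [hL2]
          simp only [List.length_cons] at hj
          rcases Nat.lt_or_ge (j + 1) acc.length with hlt | hge
          · exact hinv j hlt
          · -- j + 1 = acc.length: the boundary pair, which failed B's test
            have hj1 : j + 1 = acc.length := by omega
            cases hM : isM (acc.reverse ++ x :: r) j with
            | false => rfl
            | true =>
              exfalso
              apply hc
              simp only [isM, Bool.and_eq_true, decide_eq_true_eq, beq_iff_eq,
                List.length_append, List.length_reverse, List.length_cons] at hM
              obtain ⟨⟨hlen, h53⟩, h201⟩ := hM
              rw [List.getD_append_right _ _ _ _ (by simp; omega)] at h201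
              simp only [List.length_reverse, hj1] at h201
              rw [show acc.length - acc.length = 0 by omega] at h201
              simp only [List.getD_cons_zero] at h201
              obtain ⟨a0, acc', hacc⟩ : ∃ a0 acc', acc = a0 :: acc' := by
                cases acc with
                | nil => simp at hj1
                | cons a t => exact ⟨a, t, rfl⟩
              subst hacc
              have hj' : j = acc'.length := by simp at hj1; omega
              rw [show ((a0 :: acc').reverse : List Int) ++ x :: r
                    = acc'.reverse ++ (a0 :: x :: r) by simp] at h53
              rw [List.getD_append_right _ _ _ _ (by simp; omega)] at h53
              simp only [List.length_reverse, hj'] at h53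
              rw [show acc'.length - acc'.length = 0 by omega] at h53
              simp only [List.getD_cons_zero] at h53
              refine ⟨h201, by simp [h53], by simp at hlen hj1 ⊢; omega⟩
        have := ih r (x :: acc) n (idx + 1) (by simp at hm; omega) (by simp at hn; omega) hinv''
        rw [this]
        congr 1
        simp

-- ===== VERDICT (by name: the statement is the Claim_ definition above) =====
theorem simplify_stack_py_spec : Claim_equal_simplify_stack_py := by
  intro stack _
  unfold Spec_simplify_stack_py
  have hA : simplify_stack_py stack = specSimp stack := by
    unfold simplify_stack_py
    match stack with
    | [] =>
      rw [specSimp_of_none (firstM_eq_none (fun j => by simp [isM]))]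
    | a :: t =>
      exact aLoop_eq_spec (a :: t) 0 (by omega)
  have hB : simplify_stack_py_alt stack = specSimp stack := by
    unfold simplify_stack_py_alt
    have := bLoop_eq_spec stack.length stack [] stack.length 0 (le_refl _) (by omega)
      (fun j hj => by simp at hj)
    simpa using this
  rw [hA, hB]
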